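-- pv_equiv track=rewrite | github.com/FaiZaman/Steganograph-app-y | utility.py | binary_to_string
-- ===== SOURCE A (Python) =====
-- def binary_to_string(binary_message, delimiter):
--
--     delimiter_length = len(delimiter) * -1
--     delimiter_present = False
--
--     # split into bytes
--     message_bytes = [binary_message[i : i + 8] for i in range(0, len(binary_message), 8)]
--     message = ""
--
--     # convert each byte and append to message
--     for byte in message_bytes:
--
--         char = chr(int(byte, 2))
--         message += char
--
--         if message[delimiter_length:] == delimiter:   # reached the delimiter
--             message = message[:delimiter_length]
--             delimiter_present = True
--             break
--
--     return message, delimiter_present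
-- ===== SOURCE B (Python) =====
-- def binary_to_string(binary_message, delimiter):
--     # Search aligned start positions for the first delimiter occurrence,
--     # decoding 8-bit chunks on demand (memoized) instead of growing a string
--     # and re-checking its suffix after every byte.
--     n_bytes = (len(binary_message) + 7) // 8
--     cache = {}
--
--     def char_at(k):
--         if k not in cache:
--             cache[k] = chr(int(binary_message[8 * k: 8 * k + 8], 2))
--         return cache[k]
--
--     L = len(delimiter)
--     if delimiter:
--         for start in range(0, n_bytes - L + 1):
--             if all(char_at(start + t) == delimiter[t] for t in range(L)):
--                 return "".join(char_at(k) for k in range(start)), True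
--     return "".join(char_at(k) for k in range(n_bytes)), False
-- ===== Notes on version B (the rewrite author's own statement) =====
-- stated objective: alternative
-- what changed: B searches the chunk-aligned start positions for the first delimiter occurrence with an on-demand memoized chunk decoder and then joins only the prefix, instead of A's loop that grows the message one character at a time and re-slices its suffix after every byte.
import Mathlib
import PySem

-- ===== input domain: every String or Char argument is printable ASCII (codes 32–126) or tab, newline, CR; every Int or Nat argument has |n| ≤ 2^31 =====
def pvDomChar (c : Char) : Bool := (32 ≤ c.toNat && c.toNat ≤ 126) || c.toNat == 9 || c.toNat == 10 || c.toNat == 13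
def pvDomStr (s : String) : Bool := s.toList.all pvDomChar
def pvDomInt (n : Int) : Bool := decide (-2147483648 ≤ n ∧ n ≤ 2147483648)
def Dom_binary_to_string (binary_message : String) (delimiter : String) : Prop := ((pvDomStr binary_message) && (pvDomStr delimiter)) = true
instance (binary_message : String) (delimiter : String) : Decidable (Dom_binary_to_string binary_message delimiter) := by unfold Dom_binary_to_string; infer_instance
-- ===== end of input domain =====

-- B locates the delimiter by scanning aligned start positions with on-demand chunk decoding,
-- instead of A's char-by-char string growth with a suffix test after every byte (objective: alternative).


-- ===== PORT A =====
-- chr(int(byte, 2)); the .getD 0 totalizes the ValueError case, which Pre_ excludes (exact on Pre_)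
def pvDecodeByte (byte : List Char) : Char :=
  Char.ofNat ((PySem.Int.ofCharsBase? byte 2).getD 0).toNat

-- A's for-loop: state = message built so far; the break is the early return of the if-branch
def pvALoop (delimiter : List Char) (dlen : Int) :
    List (List Char) → List Char → List Char × Bool
  | [], message => (message, false)
  | byte :: rest, message =>
      let ch := pvDecodeByte byte
      let message := message ++ [ch]
      if PySem.List.slice message (some dlen) none = delimiter then
        (PySem.List.slice message none (some dlen), true)
      else pvALoop delimiter dlen rest message

def binary_to_string (binary_message : String) (delimiter : String) : String × Bool :=
  let bl := binary_message.toList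
  let dl := delimiter.toList
  let delimiter_length : Int := (dl.length : Int) * (-1)
  let message_bytes := (PySem.List.pyRange 0 bl.length 8).map
    (fun i => PySem.List.slice bl (some i) (some (i + 8)))
  let r := pvALoop dl delimiter_length message_bytes []
  (String.ofList r.1, r.2)

-- ===== PORT B =====
-- Source B's char_at helper: decode the 8-bit chunk starting at bit 8*k (the python memo cache
-- only avoids re-computation; the values are identical)
def pvCharAt (bl : List Char) (k : Int) : Char :=
  pvDecodeByte (PySem.List.slice bl (some (8 * k)) (some (8 * k + 8)))

def binary_to_string_alt (binary_message : String) (delimiter : String) : String × Bool :=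
  let bl := binary_message.toList
  let n_bytes : Int := PySem.Int.floordiv ((bl.length : Int) + 7) 8
  let dl := delimiter.toList
  let found? : Option Int :=
    if dl ≠ [] then
      (PySem.List.pyRange 0 (n_bytes - (dl.length : Int) + 1) 1).find? (fun s =>
        (List.range dl.length).all (fun t => pvCharAt bl (s + (t : Int)) == dl.getD t ' '))
    else none
  match found? with
  | some s => (String.ofList ((PySem.List.pyRange 0 s 1).map (pvCharAt bl)), true)
  | none => (String.ofList ((PySem.List.pyRange 0 n_bytes 1).map (pvCharAt bl)), false)

-- ===== PRECONDITION & SPEC =====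
-- Pre_ excludes exactly the inputs on which Python A raises ValueError: a malformed 8-bit chunk
-- (or one parsing to a negative value, where chr raises) that A actually reaches, i.e. one not
-- preceded by a completed delimiter occurrence among the chunks decoded before it. (The two
-- totalized ports agree on every input, so the proof does not need Pre_; Pre_ only delimits
-- where Python A actually returns.)
def pvChunkOk (byte : List Char) : Bool :=
  decide (0 ≤ (PySem.Int.ofCharsBase? byte 2).getD (-1))

def Pre_binary_to_string (binary_message : String) (delimiter : String) : Prop :=
  let chunks := (PySem.List.pyRange 0 binary_message.toList.length 8).map
    (fun i => PySem.List.slice binary_message.toList (some i) (some (i + 8)))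
  (chunks.all pvChunkOk = true) ∨
    (delimiter.toList ≠ [] ∧
      PySem.Chars.isIn delimiter.toList ((chunks.takeWhile pvChunkOk).map pvDecodeByte) = true)
instance (binary_message : String) (delimiter : String) : Decidable (Pre_binary_to_string binary_message delimiter) := by unfold Pre_binary_to_string; infer_instance
def pvWitness_binary_to_string : String × String := ("0100000101000010", "A")
def Spec_binary_to_string (binary_message : String) (delimiter : String) (out : String × Bool) : Prop := out = binary_to_string_alt binary_message delimiter
instance (binary_message : String) (delimiter : String) (out : String × Bool) : Decidable (Spec_binary_to_string binary_message delimiter out) := by unfold Spec_binary_to_string; infer_instance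

-- ===== CLAIM (what is proved, stated in full; the proofs are below) =====
def Claim_equal_binary_to_string : Prop := ∀ (binary_message : String) (delimiter : String), Dom_binary_to_string binary_message delimiter → Pre_binary_to_string binary_message delimiter → Spec_binary_to_string binary_message delimiter (binary_to_string binary_message delimiter)

-- ===== LEMMAS AND PROOFS =====

-- the decoded message as a function of the input: chunk count and char list
def pvN (bl : List Char) : Nat := (((bl.length : Int) + 7) / 8).toNat
def pvMsg (bl : List Char) : List Char := (List.range (pvN bl)).map (fun k : Nat => pvCharAt bl (k : Int))

theorem pv_bytes_eq (bl : List Char) :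
    ((PySem.List.pyRange 0 bl.length 8).map
      (fun i => PySem.List.slice bl (some i) (some (i + 8)))).map pvDecodeByte = pvMsg bl := by
  rw [PySem.List.pyRange_of_pos 0 (bl.length : Int) (by norm_num : (0:Int) < 8)]
  have hN : (if (0:Int) < (bl.length : Int) then ((((bl.length : Int)) - 0 + 8 - 1) / 8).toNat else 0)
      = pvN bl := by
    unfold pvN
    split_ifs with h
    · have he : ((bl.length : Int)) - 0 + 8 - 1 = (bl.length : Int) + 7 := by ring
      rw [he]
    · have h0 : bl.length = 0 := by omega
      simp [h0]
  rw [hN]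
  unfold pvMsg pvCharAt
  simp only [List.map_map]
  apply List.map_congr_left
  intro a _
  simp [Function.comp_def]

theorem pv_msg_getElem (bl : List Char) (k : Nat) (hk : k < pvN bl) :
    (pvMsg bl)[k]'(by simpa [pvMsg] using hk) = pvCharAt bl (k : Int) := by
  unfold pvMsg
  rw [List.getElem_map, List.getElem_range]

theorem pv_probe_iff (bl dl : List Char) (s : Nat) (h : s + dl.length ≤ pvN bl) :
    ((List.range dl.length).all
        (fun t => pvCharAt bl ((s : Int) + (t : Int)) == dl.getD t ' ') = true)
      ↔ dl <+: (pvMsg bl).drop s := by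
  have hlen : (pvMsg bl).length = pvN bl := by simp [pvMsg]
  rw [List.all_eq_true]
  constructor
  · intro hall
    rw [List.prefix_iff_eq_take]
    apply List.ext_getElem
    · simp [hlen]; omega
    · intro i h1 h2
      have hi : i < dl.length := h1
      have hsi : s + i < pvN bl := by omega
      have hbeq := hall (i : Nat) (List.mem_range.mpr hi)
      simp only [beq_iff_eq] at hbeq
      have hcast : ((s : Int) + (i : Int)) = ((s + i : Nat) : Int) := by push_cast; ring
      rw [hcast] at hbeq
      have hmg := pv_msg_getElem bl (s + i) hsi
      rw [List.getElem_take, List.getElem_drop]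
      rw [hmg, hbeq, List.getD_eq_getElem dl ' ' hi]
  · intro hpre t ht
    have htl : t < dl.length := List.mem_range.mp ht
    have hst : s + t < pvN bl := by omega
    simp only [beq_iff_eq]
    have hcast : ((s : Int) + (t : Int)) = ((s + t : Nat) : Int) := by push_cast; ring
    rw [hcast, ← pv_msg_getElem bl (s + t) hst, List.getD_eq_getElem dl ' ' htl,
      hpre.getElem htl, List.getElem_drop]

theorem pv_find?_range_eq_some {p : Nat → Bool} {M k : Nat} (hk : k < M) (hpk : p k = true)
    (hmin : ∀ j < k, p j = false) : (List.range M).find? p = some k := by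
  induction M with
  | zero => omega
  | succ M IH =>
    rw [List.range_succ, List.find?_append]
    rcases Nat.lt_or_ge k M with h | h
    · rw [IH h]; rfl
    · have hkM : k = M := by omega
      subst hkM
      have hnone : (List.range k).find? p = none := by
        rw [List.find?_eq_none]
        intro x hx
        simp [hmin x (List.mem_range.mp hx)]
      rw [hnone]
      simp [List.find?, hpk]

-- the suffix/occurrence lemmas for A's loop
theorem pv_suffix_take_of_prefix_drop {d xs : List Char} {j : Nat}
    (h : d <+: xs.drop j) : d <:+ xs.take (j + d.length) := by
  obtain ⟨t, ht⟩ := h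
  refine ⟨xs.take j, ?_⟩
  rw [List.take_add, ← ht]
  simp [List.take_left']

theorem pv_slice_from_neg_eq_iff (msg d : List Char) (hL : 0 < d.length) :
    (PySem.List.slice msg (some (-(d.length : Int))) none = d) ↔ d <:+ msg := by
  rw [PySem.List.slice_from_neg_natCast msg d.length hL]
  constructor
  · intro h; rw [← h]; exact List.drop_suffix _ _
  · rintro ⟨t, rfl⟩
    have h : (t ++ d).length - d.length = t.length := by simp
    rw [h]
    exact List.drop_left

theorem pv_find_eq (f d : List Char) (k : Nat) (h1 : d <+: f.drop k)
    (h2 : ∀ i < k, ¬ d <+: f.drop i) : PySem.Chars.find f d = k := by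
  have hinf : PySem.Chars.isIn d f = true :=
    (PySem.Chars.exists_prefix_drop_iff_isIn d f).mp ⟨k, h1⟩
  have hnn : 0 ≤ PySem.Chars.find f d :=
    (PySem.Chars.find_nonneg_iff f d).mpr ((PySem.Chars.isIn_iff_infix d f).mp hinf)
  obtain ⟨hp, hmin⟩ := PySem.Chars.find_spec hnn
  have : (PySem.Chars.find f d).toNat = k := by
    rcases lt_trichotomy (PySem.Chars.find f d).toNat k with h | h | h
    · exact absurd hp (h2 _ h)
    · exact h
    · exact absurd h1 (hmin _ h)
  omega

-- core A-side characterisation: A's loop vs find on the fully decoded list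
theorem pv_loop_eq_find (d : List Char) (hd : d ≠ []) :
    ∀ (bytes : List (List Char)) (acc : List Char),
    (∀ m, m ≤ acc.length → ¬ d <:+ acc.take m) →
    pvALoop d (-(d.length : Int)) bytes acc =
      (if PySem.Chars.find (acc ++ bytes.map pvDecodeByte) d = -1 then
        (acc ++ bytes.map pvDecodeByte, false)
      else ((acc ++ bytes.map pvDecodeByte).take
              (PySem.Chars.find (acc ++ bytes.map pvDecodeByte) d).toNat, true)) := by
  have hL : 0 < d.length := List.length_pos_iff.mpr hd
  intro bytes
  induction bytes with
  | nil =>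
    intro acc H
    have hnone : PySem.Chars.find acc d = -1 := by
      rw [PySem.Chars.find_eq_neg_one_iff]
      intro hinf
      obtain ⟨j, hj⟩ := (PySem.Chars.exists_prefix_drop_iff_isIn d acc).mpr
        ((PySem.Chars.isIn_iff_infix d acc).mpr hinf)
      have hlen : d.length ≤ (acc.drop j).length := hj.length_le
      have hjle : j + d.length ≤ acc.length := by
        simp [List.length_drop] at hlen; omega
      exact H (j + d.length) hjle (pv_suffix_take_of_prefix_drop hj)
    simp [pvALoop, hnone]
  | cons byte rest IH =>
    intro acc H
    set c := pvDecodeByte byte with hc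
    set acc' := acc ++ [c] with hacc'
    set rest' := rest.map pvDecodeByte with hrest'
    have hf : acc ++ (byte :: rest).map pvDecodeByte = acc' ++ rest' := by
      simp [hacc', hrest', hc]
    show (if PySem.List.slice acc' (some (-(d.length : Int))) none = d then
            (PySem.List.slice acc' none (some (-(d.length : Int))), true)
          else pvALoop d (-(d.length : Int)) rest acc') = _
    by_cases hs : d <:+ acc'
    · rw [if_pos ((pv_slice_from_neg_eq_iff _ _ hL).mpr hs)]
      rw [PySem.List.slice_to_neg_natCast acc' d.length hL]
      have hdle : d.length ≤ acc'.length := hs.length_le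
      obtain ⟨t, ht⟩ := hs
      have htlen : t.length = acc'.length - d.length := by
        have := congrArg List.length ht
        simp at this; omega
      have h1 : d <+: (acc ++ (byte :: rest).map pvDecodeByte).drop (acc'.length - d.length) := by
        rw [hf, ← ht]
        have hlt : (t ++ d).length - d.length = t.length := by simp
        rw [hlt, List.append_assoc, List.drop_left]
        exact ⟨rest', rfl⟩
      have h2 : ∀ i < acc'.length - d.length, ¬ d <+: (acc ++ (byte :: rest).map pvDecodeByte).drop i := by
        intro i hi hp
        have hile : i + d.length ≤ acc.length := by
          have : acc'.length = acc.length + 1 := by simp [hacc']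
          omega
        have hsuf := pv_suffix_take_of_prefix_drop hp
        rw [List.take_append_of_le_length hile] at hsuf
        exact H (i + d.length) hile hsuf
      have hfind := pv_find_eq _ _ _ h1 h2
      rw [hfind]
      have hne : ((acc'.length - d.length : Nat) : Int) ≠ -1 := by omega
      rw [if_neg hne]
      rw [hf, Int.toNat_natCast,
        List.take_append_of_le_length (l₁ := acc') (l₂ := rest') (by omega)]
    · rw [if_neg (fun h => hs ((pv_slice_from_neg_eq_iff _ _ hL).mp h))]
      have H' : ∀ m, m ≤ acc'.length → ¬ d <:+ acc'.take m := by
        intro m hm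
        rcases Nat.lt_or_ge m (acc.length + 1) with h | h
        · rw [hacc', List.take_append_of_le_length (by omega)]
          exact H m (by omega)
        · have hmeq : m = acc'.length := by simp [hacc'] at hm ⊢; omega
          rw [hmeq, List.take_length]
          exact hs
      rw [IH acc' H', hf]

theorem pv_loop_nil_delim : ∀ (bytes : List (List Char)) (acc : List Char),
    pvALoop [] 0 bytes acc = (acc ++ bytes.map pvDecodeByte, false) := by
  intro bytes
  induction bytes with
  | nil => intro acc; simp [pvALoop]
  | cons byte rest IH =>
    intro acc
    show (if PySem.List.slice (acc ++ [pvDecodeByte byte]) (some 0) none = ([] : List Char) then _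
          else pvALoop [] 0 rest (acc ++ [pvDecodeByte byte])) = _
    rw [if_neg (by simp [PySem.List.slice_none_none])]
    rw [IH]
    simp

-- B-side: the prefix decoded up to an aligned position equals a take of the full message
theorem pv_map_pyRange_take (bl : List Char) (s0 : Nat) (h : s0 ≤ pvN bl) :
    (PySem.List.pyRange 0 (s0 : Int) 1).map (pvCharAt bl) = (pvMsg bl).take s0 := by
  rw [PySem.List.pyRange_one, pvMsg]
  rw [← List.map_take, List.take_range]
  have : min s0 (pvN bl) = s0 := by omega
  rw [this, List.map_map]
  simp [Function.comp_def]

-- B-side: the search over aligned starts finds exactly the first occurrence of the delimiter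
theorem pv_b_find_eq (bl dl : List Char) (hd : dl ≠ []) :
    (PySem.List.pyRange 0 (((pvN bl : Int)) - (dl.length : Int) + 1) 1).find? (fun s =>
        (List.range dl.length).all (fun t => pvCharAt bl (s + (t : Int)) == dl.getD t ' '))
      = if PySem.Chars.find (pvMsg bl) dl = -1 then none
        else some (PySem.Chars.find (pvMsg bl) dl) := by
  have hL : 0 < dl.length := List.length_pos_iff.mpr hd
  have hlen : (pvMsg bl).length = pvN bl := by simp [pvMsg]
  rw [PySem.List.pyRange_one 0 (((pvN bl : Int)) - (dl.length : Int) + 1)]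
  rw [List.find?_map]
  have hrange : ∀ k : Nat, k < ((((pvN bl : Int)) - (dl.length : Int) + 1) - 0).toNat →
      k + dl.length ≤ pvN bl := by
    intro k hk
    omega
  by_cases hfind : PySem.Chars.find (pvMsg bl) dl = -1
  · rw [if_pos hfind]
    have hnone : List.find? ((fun s =>
        (List.range dl.length).all (fun t => pvCharAt bl (s + (t : Int)) == dl.getD t ' ')) ∘
          (fun k : Nat => ((0 : Int) + (k : Int))))
        (List.range ((((pvN bl : Int)) - (dl.length : Int) + 1) - 0).toNat) = none := by
      rw [List.find?_eq_none]
      intro x hx hpx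
      simp only [Function.comp_apply, zero_add] at hpx
      have hocc := (pv_probe_iff bl dl x (hrange x (List.mem_range.mp hx))).mp hpx
      have : PySem.Chars.isIn dl (pvMsg bl) = true :=
        (PySem.Chars.exists_prefix_drop_iff_isIn dl (pvMsg bl)).mp ⟨x, hocc⟩
      rw [PySem.Chars.find_eq_neg_one_iff] at hfind
      exact hfind ((PySem.Chars.isIn_iff_infix dl (pvMsg bl)).mp this)
    rw [hnone]
    rfl
  · rw [if_neg hfind]
    have hnn : 0 ≤ PySem.Chars.find (pvMsg bl) dl := by
      have := PySem.Chars.neg_one_le_find (pvMsg bl) dl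
      omega
    obtain ⟨hp, hmin⟩ := PySem.Chars.find_spec hnn
    set s0 : Nat := (PySem.Chars.find (pvMsg bl) dl).toNat with hs0
    have hfle : PySem.Chars.find (pvMsg bl) dl ≤ (pvMsg bl).length :=
      PySem.Chars.find_le_length (pvMsg bl) dl
    have hs0N : s0 ≤ pvN bl := by omega
    have hplen : dl.length ≤ ((pvMsg bl).drop s0).length := hp.length_le
    have hs0L : s0 + dl.length ≤ pvN bl := by
      rw [List.length_drop, hlen] at hplen
      omega
    have hsome : List.find? ((fun s =>
        (List.range dl.length).all (fun t => pvCharAt bl (s + (t : Int)) == dl.getD t ' ')) ∘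
          (fun k : Nat => ((0 : Int) + (k : Int))))
        (List.range ((((pvN bl : Int)) - (dl.length : Int) + 1) - 0).toNat) = some s0 := by
      apply pv_find?_range_eq_some
      · omega
      · simp only [Function.comp_apply, zero_add]
        exact (pv_probe_iff bl dl s0 hs0L).mpr hp
      · intro j hj
        simp only [Function.comp_apply, zero_add]
        rw [Bool.eq_false_iff]
        intro hpj
        exact hmin j hj ((pv_probe_iff bl dl j (by omega)).mp hpj)
    rw [hsome]
    simp only [Option.map_some, zero_add]
    congr 1
    omega

-- ===== VERDICT (by name: the statement is the Claim_ definition above) =====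
theorem binary_to_string_spec : Claim_equal_binary_to_string := by
  intro b d _ _
  show binary_to_string b d = binary_to_string_alt b d
  unfold binary_to_string binary_to_string_alt
  dsimp only
  have hnb : PySem.Int.floordiv ((b.toList.length : Int) + 7) 8 = ((pvN b.toList : Int)) := by
    rw [PySem.Int.floordiv_eq_ediv_of_pos (by norm_num : (0:Int) < 8)]
    unfold pvN
    omega
  by_cases hd : d.toList = []
  · have hdlen : ((d.toList.length : Int) * (-1)) = 0 := by rw [hd]; norm_num
    rw [hdlen, hd, pv_loop_nil_delim]
    rw [if_neg (by simp)]
    rw [List.nil_append, pv_bytes_eq, hnb, pv_map_pyRange_take b.toList (pvN b.toList) le_rfl]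
    have hlen : (pvMsg b.toList).length = pvN b.toList := by simp [pvMsg]
    rw [← hlen, List.take_length]
  · have hL' : ((d.toList.length : Int) * (-1)) = -(d.toList.length : Int) := by ring
    have H0 : ∀ m, m ≤ ([] : List Char).length → ¬ d.toList <:+ List.take m ([] : List Char) := by
      intro m hm hs
      exact hd (List.suffix_nil.mp (by simpa using hs))
    rw [hL', pv_loop_eq_find d.toList hd _ [] H0, List.nil_append, pv_bytes_eq,
      if_pos hd, hnb, pv_b_find_eq b.toList d.toList hd]
    by_cases hfind : PySem.Chars.find (pvMsg b.toList) d.toList = -1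
    · rw [if_pos hfind, if_pos hfind]
      rw [pv_map_pyRange_take b.toList (pvN b.toList) le_rfl]
      have hlen : (pvMsg b.toList).length = pvN b.toList := by simp [pvMsg]
      rw [← hlen, List.take_length]
    · rw [if_neg hfind, if_neg hfind]
      have hnn : 0 ≤ PySem.Chars.find (pvMsg b.toList) d.toList := by
        have := PySem.Chars.neg_one_le_find (pvMsg b.toList) d.toList
        omega
      have hle : (PySem.Chars.find (pvMsg b.toList) d.toList).toNat ≤ pvN b.toList := by
        have := PySem.Chars.find_le_length (pvMsg b.toList) d.toList
        have hlen : (pvMsg b.toList).length = pvN b.toList := by simp [pvMsg]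
        omega
      have hcast : PySem.Chars.find (pvMsg b.toList) d.toList =
          (((PySem.Chars.find (pvMsg b.toList) d.toList).toNat : Nat) : Int) := by omega
      rw [hcast]
      dsimp only
      rw [Int.toNat_natCast, pv_map_pyRange_take b.toList _ hle]
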